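-- pv_equiv track=rewrite | github.com/jae961217/Coding_Programmers | py/weekly1.py | solution
-- ===== SOURCE A (Python) =====
-- def solution(price, money, count):
--     answer = -1
--     count_sum = 0
--     for i in range(count):
--         count_sum += i + 1
--
--     answer = count_sum * price - money
--     if answer < 0:
--         answer = 0
--     return answer
-- ===== SOURCE B (Python) =====
-- def solution(price, money, count):
--     total = count * (count + 1) // 2 if count > 0 else 0
--     return max(total * price - money, 0)
-- ===== Notes on version B (the rewrite author's own statement) =====
-- stated objective: faster
-- what changed: Replaces the O(count) loop summing 1..count with the closed-form triangular number count*(count+1)//2 and a max() clamp.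
import Mathlib
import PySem

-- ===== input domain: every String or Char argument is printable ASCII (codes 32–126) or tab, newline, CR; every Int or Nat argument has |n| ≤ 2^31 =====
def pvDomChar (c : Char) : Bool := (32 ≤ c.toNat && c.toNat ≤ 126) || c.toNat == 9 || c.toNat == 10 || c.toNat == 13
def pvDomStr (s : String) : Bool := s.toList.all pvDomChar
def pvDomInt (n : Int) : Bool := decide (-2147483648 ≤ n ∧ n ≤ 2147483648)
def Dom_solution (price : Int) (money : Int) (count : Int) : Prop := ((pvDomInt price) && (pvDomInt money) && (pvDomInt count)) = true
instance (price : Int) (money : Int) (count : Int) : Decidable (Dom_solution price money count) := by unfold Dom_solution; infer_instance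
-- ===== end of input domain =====

-- B replaces the O(count) loop summing 1..count with the closed-form triangular number; return value only.
-- ===== PORT A =====
def solution (price : Int) (money : Int) (count : Int) : Int :=
  let count_sum := (PySem.List.pyRange 0 count 1).foldl (fun s i => s + (i + 1)) 0
  let answer := count_sum * price - money
  if answer < 0 then 0 else answer

-- ===== PORT B =====
def solution_alt (price : Int) (money : Int) (count : Int) : Int :=
  let total := if count > 0 then PySem.Int.floordiv (count * (count + 1)) 2 else 0
  max (total * price - money) 0

-- ===== PRECONDITION & SPEC =====
def Spec_solution (price : Int) (money : Int) (count : Int) (out : Int) : Prop := out = solution_alt price money count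
instance (price : Int) (money : Int) (count : Int) (out : Int) : Decidable (Spec_solution price money count out) := by unfold Spec_solution; infer_instance

-- ===== CLAIM (what is proved, stated in full; the proofs are below) =====
def Claim_equal_solution : Prop := ∀ (price : Int) (money : Int) (count : Int), Dom_solution price money count → Spec_solution price money count (solution price money count)

-- ===== LEMMAS AND PROOFS =====

-- ===== VERDICT (by name: the statement is the Claim_ definition above) =====
-- loop sum with arbitrary init, over List.range
lemma foldl_range_sum (n : Nat) (init : Int) :
    (List.range n).foldl (fun (s : Int) (k : Nat) => s + ((k : Int) + 1)) init = init + (n : Int) * ((n : Int) + 1) / 2 := by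
  induction n generalizing init with
  | zero => simp
  | succ m ih =>
      rw [List.range_succ, List.foldl_append, ih]
      simp only [List.foldl_cons, List.foldl_nil]
      have h2 : (2:Int) ∣ (m:Int) * (m + 1) := Int.even_mul_succ_self m |>.two_dvd
      have hring : ((m:Int) + 1) * ((m:Int) + 1 + 1) = (m:Int) * ((m:Int) + 1) + 2 * ((m:Int) + 1) := by ring
      push_cast
      omega

lemma loop_sum_eq (count : Int) :
    (PySem.List.pyRange 0 count 1).foldl (fun s i => s + (i + 1)) 0
      = (if count > 0 then PySem.Int.floordiv (count * (count + 1)) 2 else 0) := by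
  rw [PySem.List.pyRange_one]
  by_cases h : 0 < count
  · simp only [sub_zero, zero_add, h, if_pos]
    rw [List.foldl_map, foldl_range_sum count.toNat 0, zero_add,
      PySem.Int.floordiv_eq_ediv_of_pos (by omega : (0:Int) < 2)]
    have hc : ((count.toNat : Int)) = count := by omega
    rw [hc]
  · have hz : count.toNat = 0 := by omega
    simp [hz, h]

-- ===== VERDICT (by name: the statement is the Claim_ definition above) =====
theorem solution_spec : Claim_equal_solution := by
  intro price money count _
  unfold Spec_solution solution solution_alt
  rw [loop_sum_eq]
  by_cases h : 0 < count <;> simp [h] <;> omega
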